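-- pv_equiv track=rewrite | github.com/SEMP/test_connection | analyze_logs.py | categorize_ips
-- ===== SOURCE A (Python) =====
-- from typing import Dict, Set, Tuple
--
-- def categorize_ips(success_counts: Dict[str, int], failure_counts: Dict[str, int]) -> Tuple[Set[str], Set[str], Set[str]]:
--     """
--     Categorize IPs based on their response patterns.
--
--     Args:
--         success_counts: Dictionary of IP -> success count
--         failure_counts: Dictionary of IP -> failure count
--
--     Returns:
--         tuple: (never_responded, always_responded, sometimes_responded) sets
--     """
--     all_ips = set(success_counts.keys()) | set(failure_counts.keys())
--
--     never_responded = set()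
--     always_responded = set()
--     sometimes_responded = set()
--
--     for ip in all_ips:
--         successes = success_counts.get(ip, 0)
--         failures = failure_counts.get(ip, 0)
--
--         if successes == 0 and failures > 0:
--             never_responded.add(ip)
--         elif failures == 0 and successes > 0:
--             always_responded.add(ip)
--         elif successes > 0 and failures > 0:
--             sometimes_responded.add(ip)
--
--     return never_responded, always_responded, sometimes_responded
-- ===== SOURCE B (Python) =====
-- from typing import Dict, Set, Tuple
--
-- def categorize_ips(success_counts: Dict[str, int], failure_counts: Dict[str, int]) -> Tuple[Set[str], Set[str], Set[str]]:
--     """Categorize IPs by classifying during one pass over success_counts and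
--     handling failure-only IPs with set algebra (no merged key-set union loop)."""
--     never, always, sometimes = set(), set(), set()
--     for ip, s in success_counts.items():
--         f = failure_counts.get(ip, 0)
--         if s == 0:
--             if f > 0:
--                 never.add(ip)
--         elif s > 0:
--             if f > 0:
--                 sometimes.add(ip)
--             elif f == 0:
--                 always.add(ip)
--     f_pos = {ip for ip, c in failure_counts.items() if c > 0}
--     never |= f_pos - set(success_counts)
--     return never, always, sometimes
-- ===== Notes on version B (the rewrite author's own statement) =====
-- stated objective: alternative
-- what changed: B never materializes the union key set: it classifies IPs during a single pass over success_counts (nested sign tests) and picks up the failure-only IPs by set algebra (f_pos minus success keys), instead of A's one loop over the merged key set with a flat three-way elif over two lookups.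
import Mathlib
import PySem

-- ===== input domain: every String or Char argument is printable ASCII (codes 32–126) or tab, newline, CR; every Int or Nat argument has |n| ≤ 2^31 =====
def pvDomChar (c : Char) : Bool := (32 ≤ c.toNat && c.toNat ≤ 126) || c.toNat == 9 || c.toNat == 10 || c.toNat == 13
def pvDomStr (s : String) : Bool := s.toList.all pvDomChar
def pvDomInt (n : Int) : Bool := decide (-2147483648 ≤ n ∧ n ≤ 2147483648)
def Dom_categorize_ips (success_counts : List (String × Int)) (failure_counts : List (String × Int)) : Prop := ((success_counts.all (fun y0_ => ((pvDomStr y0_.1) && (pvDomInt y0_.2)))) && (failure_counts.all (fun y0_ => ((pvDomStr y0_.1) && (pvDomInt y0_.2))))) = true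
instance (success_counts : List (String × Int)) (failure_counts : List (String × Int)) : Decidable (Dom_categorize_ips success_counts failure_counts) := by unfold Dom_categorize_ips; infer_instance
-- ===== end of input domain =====

-- B classifies in one pass over success_counts and adds failure-only IPs by set difference,
-- instead of A's single loop over the union key set (objective: alternative structure, same cost).


-- ===== PORT A =====
-- loop body of A's 'for ip in all_ips' (state = the three result sets)
def stepA (sd fd : PySem.Dict String Int) (acc : List String × List String × List String) (ip : String) : List String × List String × List String :=
  let successes := PySem.Dict.getD sd ip 0
  let failures := PySem.Dict.getD fd ip 0
  if successes = 0 ∧ 0 < failures then (PySem.Set.add acc.1 ip, acc.2.1, acc.2.2)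
  else if failures = 0 ∧ 0 < successes then (acc.1, PySem.Set.add acc.2.1 ip, acc.2.2)
  else if 0 < successes ∧ 0 < failures then (acc.1, acc.2.1, PySem.Set.add acc.2.2 ip)
  else acc

def categorize_ips (success_counts : List (String × Int)) (failure_counts : List (String × Int)) : List String × List String × List String :=
  let sd := PySem.Dict.mk success_counts
  let fd := PySem.Dict.mk failure_counts
  let all_ips := PySem.Set.union (PySem.Set.ofList (PySem.Dict.keys sd)) (PySem.Set.ofList (PySem.Dict.keys fd))
  all_ips.foldl (stepA sd fd) (([] : List String), ([] : List String), ([] : List String))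

-- ===== PORT B =====
-- loop body of B's 'for ip, s in success_counts.items()'
def stepB (fd : PySem.Dict String Int) (acc : List String × List String × List String) (p : String × Int) : List String × List String × List String :=
  let f := PySem.Dict.getD fd p.1 0
  if p.2 = 0 then (if 0 < f then (PySem.Set.add acc.1 p.1, acc.2.1, acc.2.2) else acc)
  else if 0 < p.2 then
    (if 0 < f then (acc.1, acc.2.1, PySem.Set.add acc.2.2 p.1)
     else if f = 0 then (acc.1, PySem.Set.add acc.2.1 p.1, acc.2.2) else acc)
  else acc

def categorize_ips_alt (success_counts : List (String × Int)) (failure_counts : List (String × Int)) : List String × List String × List String :=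
  let sd := PySem.Dict.mk success_counts
  let fd := PySem.Dict.mk failure_counts
  let r := sd.items.foldl (stepB fd) (([] : List String), ([] : List String), ([] : List String))
  let f_pos := fd.items.foldl (fun (s : PySem.Set String) p => if 0 < p.2 then PySem.Set.add s p.1 else s) PySem.Set.empty
  (PySem.Set.union r.1 (PySem.Set.diff f_pos (PySem.Set.ofList (PySem.Dict.keys sd))), r.2.1, r.2.2)

-- ===== PRECONDITION & SPEC =====
-- Pre_ only states that the two association lists model Python dicts: keys are unique
-- (a Python dict cannot hold a duplicate key, so no input reachable from Python is excluded).
def Pre_categorize_ips (success_counts : List (String × Int)) (failure_counts : List (String × Int)) : Prop :=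
  (success_counts.map Prod.fst).Nodup ∧ (failure_counts.map Prod.fst).Nodup
instance (success_counts : List (String × Int)) (failure_counts : List (String × Int)) : Decidable (Pre_categorize_ips success_counts failure_counts) := by unfold Pre_categorize_ips; infer_instance
def pvWitness_categorize_ips : (List (String × Int)) × (List (String × Int)) :=
  ([("a", 2), ("b", 0)], [("b", 1), ("c", 3)])
def Spec_categorize_ips (success_counts : List (String × Int)) (failure_counts : List (String × Int)) (out : List String × List String × List String) : Prop := out = categorize_ips_alt success_counts failure_counts
instance (success_counts : List (String × Int)) (failure_counts : List (String × Int)) (out : List String × List String × List String) : Decidable (Spec_categorize_ips success_counts failure_counts out) := by unfold Spec_categorize_ips; infer_instance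

-- ===== CLAIM (what is proved, stated in full; the proofs are below) =====
def Claim_equal_categorize_ips : Prop := ∀ (success_counts : List (String × Int)) (failure_counts : List (String × Int)), Dom_categorize_ips success_counts failure_counts → Pre_categorize_ips success_counts failure_counts → Spec_categorize_ips success_counts failure_counts (categorize_ips success_counts failure_counts)

-- ===== LEMMAS AND PROOFS =====

-- the three classification predicates, as functions of the looked-up counts
def pvP1 (sd fd : PySem.Dict String Int) (ip : String) : Bool := decide (PySem.Dict.getD sd ip 0 = 0 ∧ 0 < PySem.Dict.getD fd ip 0)
def pvP2 (sd fd : PySem.Dict String Int) (ip : String) : Bool := decide (PySem.Dict.getD fd ip 0 = 0 ∧ 0 < PySem.Dict.getD sd ip 0)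
def pvP3 (sd fd : PySem.Dict String Int) (ip : String) : Bool := decide (0 < PySem.Dict.getD sd ip 0 ∧ 0 < PySem.Dict.getD fd ip 0)
def pvQ (fd : PySem.Dict String Int) (ip : String) : Bool := decide (0 < PySem.Dict.getD fd ip 0)

theorem foldA_eq (sd fd : PySem.Dict String Int) (l : List String) (hl : l.Nodup)
    (n a s : List String) (h : ∀ x ∈ l, x ∉ n ∧ x ∉ a ∧ x ∉ s) :
    l.foldl (stepA sd fd) (n, a, s) =
      (n ++ l.filter (pvP1 sd fd), a ++ l.filter (pvP2 sd fd), s ++ l.filter (pvP3 sd fd)) := by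
  induction l generalizing n a s with
  | nil => simp
  | cons x t ih =>
    have hx := h x (by simp)
    have hnd := hl
    rw [List.nodup_cons] at hnd
    have ht : ∀ y ∈ t, y ∉ n ∧ y ∉ a ∧ y ∉ s := fun y hy => h y (by simp [hy])
    rw [List.foldl_cons]
    by_cases h1 : PySem.Dict.getD sd x 0 = 0 ∧ 0 < PySem.Dict.getD fd x 0
    · have hstep : stepA sd fd (n, a, s) x = (n ++ [x], a, s) := by
        unfold stepA; rw [if_pos h1, PySem.Set.add_of_not_mem hx.1]
      rw [hstep, ih hnd.2 _ _ _ (fun y hy => ⟨by intro hm; rcases List.mem_append.1 hm with hm|hm; exacts [(ht y hy).1 hm, hnd.1 (List.mem_singleton.1 hm ▸ hy)], (ht y hy).2.1, (ht y hy).2.2⟩)]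
      have e1 : pvP1 sd fd x = true := by simp [pvP1, h1]
      have e2 : pvP2 sd fd x = false := by simp [pvP2]; omega
      have e3 : pvP3 sd fd x = false := by simp [pvP3]; omega
      simp [e1, e2, e3]
    · by_cases h2 : PySem.Dict.getD fd x 0 = 0 ∧ 0 < PySem.Dict.getD sd x 0
      · have hstep : stepA sd fd (n, a, s) x = (n, a ++ [x], s) := by
          unfold stepA; rw [if_neg h1, if_pos h2, PySem.Set.add_of_not_mem hx.2.1]
        rw [hstep, ih hnd.2 _ _ _ (fun y hy => ⟨(ht y hy).1, by intro hm; rcases List.mem_append.1 hm with hm|hm; exacts [(ht y hy).2.1 hm, hnd.1 (List.mem_singleton.1 hm ▸ hy)], (ht y hy).2.2⟩)]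
        have e1 : pvP1 sd fd x = false := by simp [pvP1]; omega
        have e2 : pvP2 sd fd x = true := by simp [pvP2, h2]
        have e3 : pvP3 sd fd x = false := by simp [pvP3]; omega
        simp [e1, e2, e3]
      · by_cases h3 : 0 < PySem.Dict.getD sd x 0 ∧ 0 < PySem.Dict.getD fd x 0
        · have hstep : stepA sd fd (n, a, s) x = (n, a, s ++ [x]) := by
            unfold stepA; rw [if_neg h1, if_neg h2, if_pos h3, PySem.Set.add_of_not_mem hx.2.2]
          rw [hstep, ih hnd.2 _ _ _ (fun y hy => ⟨(ht y hy).1, (ht y hy).2.1, by intro hm; rcases List.mem_append.1 hm with hm|hm; exacts [(ht y hy).2.2 hm, hnd.1 (List.mem_singleton.1 hm ▸ hy)]⟩)]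
          have e1 : pvP1 sd fd x = false := by simp [pvP1]; omega
          have e2 : pvP2 sd fd x = false := by simp [pvP2]; omega
          have e3 : pvP3 sd fd x = true := by simp [pvP3, h3]
          simp [e1, e2, e3]
        · have hstep : stepA sd fd (n, a, s) x = (n, a, s) := by
            unfold stepA; rw [if_neg h1, if_neg h2, if_neg h3]
          rw [hstep, ih hnd.2 _ _ _ ht]
          have e1 : pvP1 sd fd x = false := by simp [pvP1]; omega
          have e2 : pvP2 sd fd x = false := by simp [pvP2]; omega
          have e3 : pvP3 sd fd x = false := by simp [pvP3]; omega
          simp [e1, e2, e3]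

theorem foldB_eq (sd fd : PySem.Dict String Int) (l : List (String × Int)) (hl : (l.map Prod.fst).Nodup)
    (hv : ∀ p ∈ l, PySem.Dict.getD sd p.1 0 = p.2)
    (n a s : List String) (h : ∀ p ∈ l, p.1 ∉ n ∧ p.1 ∉ a ∧ p.1 ∉ s) :
    l.foldl (stepB fd) (n, a, s) =
      (n ++ (l.map Prod.fst).filter (pvP1 sd fd), a ++ (l.map Prod.fst).filter (pvP2 sd fd),
        s ++ (l.map Prod.fst).filter (pvP3 sd fd)) := by
  induction l generalizing n a s with
  | nil => simp
  | cons x t ih =>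
    have hx := h x (by simp)
    have hgs : PySem.Dict.getD sd x.1 0 = x.2 := hv x (by simp)
    rw [List.map_cons, List.nodup_cons] at hl
    have ht : ∀ p ∈ t, p.1 ∉ n ∧ p.1 ∉ a ∧ p.1 ∉ s := fun p hp => h p (by simp [hp])
    have hxt : ∀ p ∈ t, x.1 ≠ p.1 := by
      intro p hp e
      exact hl.1 (e ▸ List.mem_map_of_mem hp)
    have hvt : ∀ p ∈ t, PySem.Dict.getD sd p.1 0 = p.2 := fun p hp => hv p (by simp [hp])
    rw [List.foldl_cons, List.map_cons]
    have e1f : PySem.Dict.getD sd x.1 0 ≠ 0 → pvP1 sd fd x.1 = false := by intro hh; simp [pvP1]; omega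
    have e2f : PySem.Dict.getD fd x.1 0 ≠ 0 → pvP2 sd fd x.1 = false := by intro hh; simp [pvP2]; omega
    have e2f' : ¬ 0 < PySem.Dict.getD sd x.1 0 → pvP2 sd fd x.1 = false := by intro hh; simp [pvP2]; omega
    have e3f : ¬ 0 < PySem.Dict.getD fd x.1 0 → pvP3 sd fd x.1 = false := by intro hh; simp [pvP3]; omega
    have e3f' : ¬ 0 < PySem.Dict.getD sd x.1 0 → pvP3 sd fd x.1 = false := by intro hh; simp [pvP3]; omega
    by_cases h0 : x.2 = 0
    · by_cases hf : 0 < PySem.Dict.getD fd x.1 0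
      · have hstep : stepB fd (n, a, s) x = (n ++ [x.1], a, s) := by
          unfold stepB; rw [if_pos h0, if_pos hf, PySem.Set.add_of_not_mem hx.1]
        rw [hstep, ih hl.2 hvt _ _ _
          (fun p hp => ⟨by intro hm; rcases List.mem_append.1 hm with hm|hm; exacts [(ht p hp).1 hm, (hxt p hp) (List.mem_singleton.1 hm).symm], (ht p hp).2.1, (ht p hp).2.2⟩)]
        have e1 : pvP1 sd fd x.1 = true := by simp [pvP1, hgs, h0, hf]
        simp [e1, e2f' (by omega), e3f' (by omega)]
      · have hstep : stepB fd (n, a, s) x = (n, a, s) := by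
          unfold stepB; rw [if_pos h0, if_neg hf]
        rw [hstep, ih hl.2 hvt _ _ _ ht]
        have e1 : pvP1 sd fd x.1 = false := by simp [pvP1, hgs]; omega
        simp [e1, e2f' (by omega), e3f' (by omega)]
    · by_cases hp0 : 0 < x.2
      · by_cases hf : 0 < PySem.Dict.getD fd x.1 0
        · have hstep : stepB fd (n, a, s) x = (n, a, s ++ [x.1]) := by
            unfold stepB; rw [if_neg h0, if_pos hp0, if_pos hf, PySem.Set.add_of_not_mem hx.2.2]
          rw [hstep, ih hl.2 hvt _ _ _
            (fun p hp => ⟨(ht p hp).1, (ht p hp).2.1, by intro hm; rcases List.mem_append.1 hm with hm|hm; exacts [(ht p hp).2.2 hm, (hxt p hp) (List.mem_singleton.1 hm).symm]⟩)]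
          have e3 : pvP3 sd fd x.1 = true := by simp [pvP3, hgs, hp0, hf]
          simp [e1f (by omega), e2f (by omega), e3]
        · by_cases hf0 : PySem.Dict.getD fd x.1 0 = 0
          · have hstep : stepB fd (n, a, s) x = (n, a ++ [x.1], s) := by
              unfold stepB; rw [if_neg h0, if_pos hp0, if_neg hf, if_pos hf0, PySem.Set.add_of_not_mem hx.2.1]
            rw [hstep, ih hl.2 hvt _ _ _
              (fun p hp => ⟨(ht p hp).1, by intro hm; rcases List.mem_append.1 hm with hm|hm; exacts [(ht p hp).2.1 hm, (hxt p hp) (List.mem_singleton.1 hm).symm], (ht p hp).2.2⟩)]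
            have e2 : pvP2 sd fd x.1 = true := by simp [pvP2, hgs, hp0, hf0]
            simp [e1f (by omega), e2, e3f (by omega)]
          · have hstep : stepB fd (n, a, s) x = (n, a, s) := by
              unfold stepB; rw [if_neg h0, if_pos hp0, if_neg hf, if_neg hf0]
            rw [hstep, ih hl.2 hvt _ _ _ ht]
            simp [e1f (by omega), e2f (by omega), e3f (by omega)]
      · have hstep : stepB fd (n, a, s) x = (n, a, s) := by
          unfold stepB; rw [if_neg h0, if_neg hp0]
        rw [hstep, ih hl.2 hvt _ _ _ ht]
        simp [e1f (by omega), e2f' (by omega), e3f' (by omega)]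

theorem foldF_eq (fd : PySem.Dict String Int) (l : List (String × Int)) (hl : (l.map Prod.fst).Nodup)
    (hv : ∀ p ∈ l, PySem.Dict.getD fd p.1 0 = p.2) (acc : PySem.Set String)
    (h : ∀ p ∈ l, p.1 ∉ acc) :
    l.foldl (fun (s : PySem.Set String) p => if 0 < p.2 then PySem.Set.add s p.1 else s) acc =
      acc ++ (l.map Prod.fst).filter (pvQ fd) := by
  induction l generalizing acc with
  | nil => simp
  | cons x t ih =>
    have hgf : PySem.Dict.getD fd x.1 0 = x.2 := hv x (by simp)
    rw [List.map_cons, List.nodup_cons] at hl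
    have hxt : ∀ p ∈ t, x.1 ≠ p.1 := by
      intro p hp e
      exact hl.1 (e ▸ List.mem_map_of_mem hp)
    simp only [List.foldl_cons, List.map_cons, List.filter_cons]
    by_cases hp : 0 < x.2
    · rw [if_pos hp]
      rw [PySem.Set.add_of_not_mem (h x (by simp))]
      rw [ih hl.2 (fun p hp => hv p (by simp [hp])) _
        (fun p hpt => by intro hm; rcases List.mem_append.1 hm with hm|hm; exacts [h p (by simp [hpt]) hm, (hxt p hpt) (List.mem_singleton.1 hm).symm])]
      have e : pvQ fd x.1 = true := by simp [pvQ, hgf, hp]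
      simp [e]
    · rw [if_neg hp]
      rw [ih hl.2 (fun p hp => hv p (by simp [hp])) _ (fun p hpt => h p (by simp [hpt]))]
      have e : pvQ fd x.1 = false := by simp [pvQ, hgf]; omega
      simp [e]

-- ===== VERDICT (by name: the statement is the Claim_ definition above) =====
theorem categorize_ips_spec : Claim_equal_categorize_ips := by
  intro sc fc _ hpre
  obtain ⟨hs, hf⟩ := hpre
  unfold Spec_categorize_ips categorize_ips categorize_ips_alt
  simp only []
  set sd := PySem.Dict.mk sc
  set fd := PySem.Dict.mk fc
  have hks : PySem.Dict.keys sd = sc.map Prod.fst := rfl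
  have hkf : PySem.Dict.keys fd = fc.map Prod.fst := rfl
  set ks := sc.map Prod.fst with hksd
  set kf := fc.map Prod.fst with hkfd
  have hofs : PySem.Set.ofList ks = ks := PySem.Set.ofList_eq_self_of_nodup ks hs
  have hoff : PySem.Set.ofList kf = kf := PySem.Set.ofList_eq_self_of_nodup kf hf
  set rest := kf.filter (fun y => !(PySem.Set.contains ks y)) with hrest
  have hall : PySem.Set.union (PySem.Set.ofList (PySem.Dict.keys sd)) (PySem.Set.ofList (PySem.Dict.keys fd)) = ks ++ rest := by
    rw [hks, hkf, hofs, hoff]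
    show PySem.Set.update ks kf = ks ++ rest
    rw [PySem.Set.update_eq_append_filter, hoff]
  -- facts about membership in rest
  have hrest_not : ∀ x ∈ rest, x ∉ ks := by
    intro x hx
    rw [hrest] at hx
    simp [List.mem_filter] at hx
    exact hx.2
  have hrest_gs : ∀ x ∈ rest, PySem.Dict.getD sd x 0 = 0 := by
    intro x hx
    apply PySem.Dict.getD_of_not_contains _ _
    rw [← Bool.not_eq_true, PySem.Dict.contains_iff_mem_keys, hks]
    exact hrest_not x hx
  have hrest_nd : rest.Nodup := List.Nodup.filter _ hf
  have hnd_all : (ks ++ rest).Nodup :=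
    List.Nodup.append hs hrest_nd (List.disjoint_right.2 (fun {x} hx => hrest_not x hx))
  -- evaluate A's loop
  rw [hall, foldA_eq sd fd (ks ++ rest) hnd_all [] [] [] (by simp)]
  -- evaluate B's loops
  have hvs : ∀ p ∈ sd.items, PySem.Dict.getD sd p.1 0 = p.2 := by
    intro p hp
    obtain ⟨k, v⟩ := p
    exact PySem.Dict.getD_of_mem_items sd hp (hks ▸ hs) 0
  have hvf : ∀ p ∈ fd.items, PySem.Dict.getD fd p.1 0 = p.2 := by
    intro p hp
    obtain ⟨k, v⟩ := p
    exact PySem.Dict.getD_of_mem_items fd hp (hkf ▸ hf) 0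
  have hitems_s : sd.items = sc := rfl
  have hitems_f : fd.items = fc := rfl
  rw [foldB_eq sd fd sd.items (by rw [hitems_s]; exact hs) hvs [] [] [] (by simp)]
  rw [foldF_eq fd fd.items (by rw [hitems_f]; exact hf) hvf PySem.Set.empty (by simp [PySem.Set.empty])]
  simp only [hitems_s, hitems_f, ← hksd, ← hkfd, PySem.Set.empty, List.nil_append]
  -- B's never set: union of the pass-1 never list with the key-difference
  have hdiff : PySem.Set.diff (kf.filter (pvQ fd)) (PySem.Set.ofList (PySem.Dict.keys sd)) =
      (kf.filter (pvQ fd)).filter (fun x => !(PySem.Set.contains ks x)) := by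
    rw [hks, hofs]; rfl
  have hdiff_sub : ∀ x ∈ (kf.filter (pvQ fd)).filter (fun x => !(PySem.Set.contains ks x)), x ∉ ks.filter (pvP1 sd fd) := by
    intro x hx hmem
    have h2 := (List.mem_filter.1 hx).2
    simp at h2
    exact h2 ((List.mem_filter.1 hmem).1)
  have hdiff_nd : ((kf.filter (pvQ fd)).filter (fun x => !(PySem.Set.contains ks x))).Nodup :=
    List.Nodup.filter _ (List.Nodup.filter _ hf)
  have hunion2 : PySem.Set.union (ks.filter (pvP1 sd fd))
      ((kf.filter (pvQ fd)).filter (fun x => !(PySem.Set.contains ks x))) =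
      ks.filter (pvP1 sd fd) ++ (kf.filter (pvQ fd)).filter (fun x => !(PySem.Set.contains ks x)) :=
    PySem.Set.update_eq_append_of_disjoint _ _ hdiff_nd hdiff_sub
  rw [hdiff, hunion2]
  -- componentwise equality
  refine Prod.ext ?_ (Prod.ext ?_ ?_)
  · show (ks ++ rest).filter (pvP1 sd fd) = ks.filter (pvP1 sd fd) ++ (kf.filter (pvQ fd)).filter (fun x => !(PySem.Set.contains ks x))
    rw [List.filter_append]
    congr 1
    rw [hrest, List.filter_filter, List.filter_filter]
    apply List.filter_congr
    intro x hx
    by_cases hc : x ∈ ks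
    · simp [hc]
    · have hgs0 : PySem.Dict.getD sd x 0 = 0 := by
        apply PySem.Dict.getD_of_not_contains _ _
        rw [← Bool.not_eq_true, PySem.Dict.contains_iff_mem_keys, hks]
        exact hc
      simp [hc, pvP1, pvQ, hgs0]
  · show (ks ++ rest).filter (pvP2 sd fd) = ks.filter (pvP2 sd fd)
    rw [List.filter_append]
    have : rest.filter (pvP2 sd fd) = [] := by
      rw [List.filter_eq_nil_iff]
      intro x hx
      have := hrest_gs x hx
      simp [pvP2, this]
    simp [this]
  · show (ks ++ rest).filter (pvP3 sd fd) = ks.filter (pvP3 sd fd)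
    rw [List.filter_append]
    have : rest.filter (pvP3 sd fd) = [] := by
      rw [List.filter_eq_nil_iff]
      intro x hx
      have := hrest_gs x hx
      simp [pvP3, this]
    simp [this]
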